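-- pv_equiv track=rewrite | github.com/drhannahsc-arch/MABE | core/design_engine.py | _compact_donors
-- ===== SOURCE A (Python) =====
-- def _compact_donors(subtypes: list[str]) -> str:
--     """Compact donor list for display: N_amine×2, O_carboxylate×4."""
--     from collections import Counter
--     counts = Counter(subtypes)
--     parts = []
--     for st, n in sorted(counts.items()):
--         short = st.split("_")[1] if "_" in st else st
--         el = st.split("_")[0]
--         if n == 1:
--             parts.append(f"{el}-{short}")
--         else:
--             parts.append(f"{el}-{short}×{n}")
--     return " + ".join(parts)
-- ===== SOURCE B (Python) =====
-- def _fmt(st, n):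
--     short = st.split("_")[1] if "_" in st else st
--     el = st.split("_")[0]
--     return f"{el}-{short}" if n == 1 else f"{el}-{short}×{n}"
--
--
-- def _compact_donors(subtypes: list[str]) -> str:
--     """Compact donor list for display: N_amine×2, O_carboxylate×4."""
--     parts = []
--     prev = None
--     n = 0
--     for st in sorted(subtypes):
--         if n and st == prev:
--             n += 1
--         else:
--             if n:
--                 parts.append(_fmt(prev, n))
--             prev = st
--             n = 1
--     if n:
--         parts.append(_fmt(prev, n))
--     return " + ".join(parts)
-- ===== Notes on version B (the rewrite author's own statement) =====
-- stated objective: alternative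
-- what changed: Replaces the Counter hash-table aggregation followed by sorting of its items with sort-first-then-group: B sorts the raw list once and a single linear pass over it counts each run of equal consecutive elements and formats it on the fly, so no dict is ever built.
import Mathlib
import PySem

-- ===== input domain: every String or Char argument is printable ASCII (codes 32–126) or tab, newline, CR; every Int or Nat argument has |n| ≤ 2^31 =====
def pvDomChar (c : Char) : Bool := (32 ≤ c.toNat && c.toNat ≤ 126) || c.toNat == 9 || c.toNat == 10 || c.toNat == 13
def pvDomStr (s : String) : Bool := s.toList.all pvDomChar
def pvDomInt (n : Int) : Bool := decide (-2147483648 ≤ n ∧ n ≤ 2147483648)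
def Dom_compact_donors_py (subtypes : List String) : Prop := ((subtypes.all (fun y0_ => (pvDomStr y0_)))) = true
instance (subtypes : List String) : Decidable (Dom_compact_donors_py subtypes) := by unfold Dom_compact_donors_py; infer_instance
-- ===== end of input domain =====

-- B replaces A's Counter-then-sort-items aggregation with a sort-first scan over runs of
-- equal consecutive elements; same output, similar cost (objective: alternative).

-- ===== PORT A =====
-- the loop body's formatting of one (st, n) item (split on "_", the n == 1 branch);
-- "_" ≠ "" so split? is always some, and the indexed pieces provably exist, so the getD defaults are unreachable
def pvFmtA (st : String) (n : Int) : String :=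
  let short := if PySem.Str.isIn "_" st
               then (PySem.List.pyGet? ((PySem.Str.split? st "_").getD []) 1).getD ""
               else st
  let el := (PySem.List.pyGet? ((PySem.Str.split? st "_").getD []) 0).getD ""
  if n = 1 then el ++ "-" ++ short else el ++ "-" ++ short ++ "×" ++ PySem.Int.toStr n

def compact_donors_py (subtypes : List String) : String :=
  let counts := PySem.Dict.counter subtypes
  let parts := (PySem.List.sorted2 counts.items (fun p => p.1) (fun p => p.2)).foldl
      (fun acc p => acc ++ [pvFmtA p.1 p.2]) []
  PySem.Str.join " + " parts

-- ===== PORT B =====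
-- same formatting lines as Source B's loop body carries (they are identical in the two Pythons)
def pvFmtB (st : String) (n : Int) : String :=
  let short := if PySem.Str.isIn "_" st
               then (PySem.List.pyGet? ((PySem.Str.split? st "_").getD []) 1).getD ""
               else st
  let el := (PySem.List.pyGet? ((PySem.Str.split? st "_").getD []) 0).getD ""
  if n = 1 then el ++ "-" ++ short else el ++ "-" ++ short ++ "×" ++ PySem.Int.toStr n

-- Source B's single pass over the sorted list: state (prev, n, parts); a run of equal
-- elements bumps n, a new element flushes the finished run's part
def pvStep (s : Option String × Int × List String) (st : String) : Option String × Int × List String :=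
  if s.2.1 ≠ 0 ∧ some st = s.1 then (s.1, s.2.1 + 1, s.2.2)
  else (some st, 1,
    -- 'if n: parts.append(_fmt(prev, n))'; prev is None only when n = 0, so getD is unreachable
    if s.2.1 ≠ 0 then s.2.2 ++ [pvFmtB (s.1.getD "") s.2.1] else s.2.2)

-- the trailing 'if n: parts.append(_fmt(prev, n))' after the loop
def pvFinish (s : Option String × Int × List String) : List String :=
  if s.2.1 ≠ 0 then s.2.2 ++ [pvFmtB (s.1.getD "") s.2.1] else s.2.2

def compact_donors_py_alt (subtypes : List String) : String :=
  PySem.Str.join " + "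
    (pvFinish ((PySem.List.sorted subtypes (fun x => x)).foldl pvStep (none, 0, [])))

-- ===== PRECONDITION & SPEC =====
def Spec_compact_donors_py (subtypes : List String) (out : String) : Prop := out = compact_donors_py_alt subtypes
instance (subtypes : List String) (out : String) : Decidable (Spec_compact_donors_py subtypes out) := by unfold Spec_compact_donors_py; infer_instance

-- ===== CLAIM (what is proved, stated in full; the proofs are below) =====
def Claim_equal_compact_donors_py : Prop := ∀ (subtypes : List String), Dom_compact_donors_py subtypes → Spec_compact_donors_py subtypes (compact_donors_py subtypes)

-- ===== LEMMAS AND PROOFS =====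

-- proof-side skeleton of B's loop: the (element, run length) pairs it walks through
def pvPairs : List String → List (String × Int)
  | [] => []
  | st :: t =>
    (st, (List.count st (st :: t) : Int)) ::
      pvPairs ((st :: t).drop (List.count st (st :: t)))
termination_by l => l.length
decreasing_by
  have h1 : 1 ≤ List.count st (st :: t) := by simp [List.count_cons_self]
  simp only [List.length_drop, List.length_cons]
  omega

theorem pvFmt_eq : pvFmtA = pvFmtB := rfl

-- the fold's invariant: with an open run (st, n) and a sorted remainder whose elements
-- are all ≥ st, the finished parts are the run merged with the remainder's runs
theorem pvFoldRuns (l : List String) (st : String) (n : Int) (parts : List String)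
    (hs : l.Pairwise (· ≤ ·)) (hge : ∀ z ∈ l, st ≤ z) (hn : 1 ≤ n) :
    pvFinish (l.foldl pvStep (some st, n, parts)) =
      parts ++ pvFmtB st (n + (List.count st l : Int)) ::
        (pvPairs (l.drop (List.count st l))).map (fun p => pvFmtB p.1 p.2) := by
  induction l generalizing st n parts with
  | nil =>
    simp only [List.foldl_nil, List.count_nil, List.drop_nil]
    rw [pvPairs, pvFinish]
    simp only [List.map_nil]
    rw [if_pos (show (((some st : Option String), n, parts) : Option String × Int × List String).2.1 ≠ 0 from by show n ≠ 0; omega)]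
    simp
  | cons y t ih =>
    obtain ⟨hhd, htl⟩ := List.pairwise_cons.mp hs
    by_cases hy : y = st
    · subst hy
      rw [List.foldl_cons]
      rw [show pvStep (some y, n, parts) y = (some y, n + 1, parts) from by
        rw [pvStep, if_pos ⟨show n ≠ 0 by omega, rfl⟩]]
      rw [ih y (n + 1) parts htl hhd (by omega)]
      rw [List.count_cons_self, List.drop_succ_cons]
      congr 3
      push_cast
      ring
    · have hylt : st < y := lt_of_le_of_ne (hge y List.mem_cons_self) (fun h => hy h.symm)
      have hlt : ∀ z ∈ y :: t, st < z := by
        intro z hz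
        rcases List.mem_cons.mp hz with h | hz
        · rw [h]; exact hylt
        · exact lt_of_lt_of_le hylt (hhd z hz)
      have hst0 : List.count st (y :: t) = 0 :=
        List.count_eq_zero.mpr (fun hm => lt_irrefl st (hlt st hm))
      rw [List.foldl_cons]
      rw [show pvStep (some st, n, parts) y = (some y, 1, parts ++ [pvFmtB st n]) from by
        rw [pvStep, if_neg (by
          rintro ⟨-, h⟩
          exact hy (Option.some_inj.mp h))]
        simp only
        rw [if_pos (by omega : n ≠ 0)]
        rfl]
      rw [ih y 1 (parts ++ [pvFmtB st n]) htl hhd (le_refl 1)]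
      rw [hst0, List.drop_zero, pvPairs]
      simp only [List.map_cons, List.count_cons_self]
      rw [List.append_assoc]
      simp only [List.singleton_append, List.drop_succ_cons]
      have hc : (1 : Int) + (List.count y t : Int) = ((List.count y t + 1 : Nat) : Int) := by
        push_cast
        ring
      rw [hc]
      norm_num

-- B's whole loop produces exactly the formatted (element, run length) pairs
theorem pvAlt_parts (l : List String) (hs : l.Pairwise (· ≤ ·)) :
    pvFinish (l.foldl pvStep (none, 0, [])) = (pvPairs l).map (fun p => pvFmtB p.1 p.2) := by
  cases l with
  | nil => rw [pvFinish, pvPairs]; simp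
  | cons st t =>
    obtain ⟨hhd, htl⟩ := List.pairwise_cons.mp hs
    rw [List.foldl_cons]
    rw [show pvStep (none, 0, []) st = (some st, 1, []) from by
      rw [pvStep, if_neg (by rintro ⟨h, -⟩; exact h rfl)]
      simp]
    rw [pvFoldRuns t st 1 [] htl hhd (le_refl 1)]
    rw [pvPairs]
    simp only [List.map_cons, List.count_cons_self, List.drop_succ_cons, List.nil_append]
    congr 2
    push_cast
    ring

-- in a sorted list the first (count of the head) entries are all the head
theorem pvTake_count (t : List String) (st : String)
    (hs : (st :: t).Pairwise (· ≤ ·)) :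
    (st :: t).take (List.count st (st :: t)) =
      List.replicate (List.count st (st :: t)) st := by
  induction t generalizing st with
  | nil => simp
  | cons y t' ih =>
    obtain ⟨hhd, htl⟩ := List.pairwise_cons.mp hs
    by_cases hy : y = st
    · subst hy
      have hrec := ih y htl
      rw [List.count_cons_self, List.take_succ_cons, List.replicate_succ, hrec]
    · have hnot : st ∉ y :: t' := by
        intro hm
        rcases List.mem_cons.mp hm with h | h
        · exact hy h.symm
        · have h1 : st ≤ y := hhd y List.mem_cons_self
          have h2 : y ≤ st := (List.pairwise_cons.mp htl).1 st h
          exact hy (le_antisymm h2 h1)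
      have h0 : List.count st (y :: t') = 0 := List.count_eq_zero.mpr hnot
      rw [List.count_cons_self, h0]
      simp

-- key facts about the head's run in a sorted list: everything after it is strictly larger,
-- and counts of larger elements survive the drop
theorem pvDrop_facts (t : List String) (st : String)
    (hs : (st :: t).Pairwise (· ≤ ·)) :
    (∀ y ∈ (st :: t).drop (List.count st (st :: t)), st < y) ∧
    (∀ k, st < k → List.count k (st :: t) =
        List.count k ((st :: t).drop (List.count st (st :: t)))) := by
  have hsplit : ∀ k : String, List.count k (st :: t) =
      List.count k ((st :: t).take (List.count st (st :: t))) +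
      List.count k ((st :: t).drop (List.count st (st :: t))) := by
    intro k
    conv_lhs => rw [← List.take_append_drop (List.count st (st :: t)) (st :: t)]
    exact List.count_append ..
  have htake := pvTake_count t st hs
  have hcount_drop : List.count st ((st :: t).drop (List.count st (st :: t))) = 0 := by
    have h := hsplit st
    rw [htake, List.count_replicate] at h
    simp only [beq_self_eq_true, if_true] at h
    omega
  have hnotmem : st ∉ (st :: t).drop (List.count st (st :: t)) :=
    List.count_eq_zero.mp hcount_drop
  constructor
  · intro y hy
    have hyl : y ∈ st :: t := List.mem_of_mem_drop hy
    have hle : st ≤ y := by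
      rcases List.mem_cons.mp hyl with h | h
      · exact h ▸ le_refl _
      · exact (List.pairwise_cons.mp hs).1 y h
    have hne : y ≠ st := fun h => hnotmem (h ▸ hy)
    exact lt_of_le_of_ne hle (Ne.symm hne)
  · intro k hk
    have hkst : st ≠ k := ne_of_lt hk
    have h := hsplit k
    rw [htake, List.count_replicate] at h
    simp only [beq_iff_eq, if_neg hkst] at h
    omega

theorem pvPairs_mem (l : List String) (hs : l.Pairwise (· ≤ ·)) (p : String × Int) :
    p ∈ pvPairs l ↔ (p.1 ∈ l ∧ p.2 = (List.count p.1 l : Int)) := by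
  induction l using pvPairs.induct with
  | case1 => rw [pvPairs]; simp
  | case2 st t ih =>
    obtain ⟨hlt, hcnt⟩ := pvDrop_facts t st hs
    have hsd : ((st :: t).drop (List.count st (st :: t))).Pairwise (· ≤ ·) :=
      List.Pairwise.sublist (List.drop_sublist _ _) hs
    rw [pvPairs, List.mem_cons, ih hsd]
    constructor
    · rintro (rfl | ⟨h1, h2⟩)
      · exact ⟨List.mem_cons_self, rfl⟩
      · refine ⟨List.mem_of_mem_drop h1, ?_⟩
        rw [h2, hcnt p.1 (hlt p.1 h1)]
    · rintro ⟨h1, h2⟩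
      by_cases hp : p.1 = st
      · left
        obtain ⟨p1, p2⟩ := p
        simp only at hp h2
        subst hp
        simp [h2]
      · right
        have hple : st < p.1 := by
          rcases List.mem_cons.mp h1 with h | h

          · exact absurd h hp
          · exact lt_of_le_of_ne ((List.pairwise_cons.mp hs).1 p.1 h) (Ne.symm hp)
        refine ⟨?_, by rw [h2, hcnt p.1 hple]⟩
        rw [← List.take_append_drop (List.count st (st :: t)) (st :: t)] at h1
        rcases List.mem_append.mp h1 with h | h
        · rw [pvTake_count t st hs] at h
          exact absurd (List.eq_of_mem_replicate h) hp
        · exact h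

theorem pvPairs_fst_pairwise (l : List String) (hs : l.Pairwise (· ≤ ·)) :
    (pvPairs l).Pairwise (fun a b => a.1 < b.1) := by
  induction l using pvPairs.induct with
  | case1 => rw [pvPairs]; simp
  | case2 st t ih =>
    obtain ⟨hlt, _⟩ := pvDrop_facts t st hs
    have hsd : ((st :: t).drop (List.count st (st :: t))).Pairwise (· ≤ ·) :=
      List.Pairwise.sublist (List.drop_sublist _ _) hs
    rw [pvPairs]
    refine List.Pairwise.cons ?_ (ih hsd)
    intro q hq
    have := (pvPairs_mem _ hsd q).mp hq
    exact hlt q.1 this.1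

-- comparator congruence: insertion-sorting with two comparators that agree on the
-- elements involved yields the same list
theorem pvInsertBy_congr {α : Type} (b b' : α → α → Bool) (x : α) (ys : List α)
    (h : ∀ y ∈ ys, b x y = b' x y) :
    PySem.List.insertBy b x ys = PySem.List.insertBy b' x ys := by
  induction ys with
  | nil => rfl
  | cons y ys ih =>
    simp only [PySem.List.insertBy]
    rw [h y List.mem_cons_self]
    split
    · rfl
    · rw [ih (fun z hz => h z (List.mem_cons_of_mem _ hz))]

theorem pvFoldl_insertBy_congr {α : Type} (b b' : α → α → Bool) :
    ∀ (xs acc : List α),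
    (∀ a ∈ xs, ∀ c, (c ∈ xs ∨ c ∈ acc) → b a c = b' a c) →
    xs.foldl (fun acc x => PySem.List.insertBy b x acc) acc =
      xs.foldl (fun acc x => PySem.List.insertBy b' x acc) acc := by
  intro xs
  induction xs with
  | nil => intro acc h; rfl
  | cons x xs ih =>
    intro acc h
    simp only [List.foldl_cons]
    rw [pvInsertBy_congr b b' x acc
      (fun y hy => h x List.mem_cons_self y (Or.inr hy))]
    exact ih _ (fun a ha c hc => by
      refine h a (List.mem_cons_of_mem _ ha) c ?_
      rcases hc with hc | hc
      · exact Or.inl (List.mem_cons_of_mem _ hc)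
      · rcases (PySem.List.mem_insertBy b' x c acc).mp hc with rfl | hc
        · exact Or.inl List.mem_cons_self
        · exact Or.inr hc)

-- Python's sort of (key, value) tuples is a sort by key alone when equal keys carry equal values
theorem pvSorted2_eq_sorted_fst (xs : List (String × Int))
    (h : ∀ a ∈ xs, ∀ b ∈ xs, a.1 = b.1 → a.2 = b.2) :
    PySem.List.sorted2 xs (fun p => p.1) (fun p => p.2) =
      PySem.List.sorted xs (fun p => p.1) := by
  simp only [PySem.List.sorted2, PySem.List.sorted, if_neg (by decide : ¬ (false = true))]
  apply pvFoldl_insertBy_congr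
  intro a ha c hc
  have hc' : c ∈ xs := by
    rcases hc with hc | hc
    · exact hc
    · simp at hc
  rcases lt_trichotomy a.1 c.1 with hlt | heq | hgt
  · simp [hlt, not_lt_of_gt hlt]
  · have h2 : a.2 = c.2 := h a ha c hc' heq
    simp [heq, h2]
  · simp [hgt, not_lt_of_gt hgt]

-- ===== VERDICT (by name: the statement is the Claim_ definition above) =====
theorem compact_donors_py_spec : Claim_equal_compact_donors_py := by
  intro subtypes _
  unfold Spec_compact_donors_py compact_donors_py compact_donors_py_alt
  simp only
  have hfold := PySem.List.foldl_append_singleton_eq_map (fun p : String × Int => pvFmtA p.1 p.2)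
    (PySem.List.sorted2 (PySem.Dict.counter subtypes).items (fun p => p.1) (fun p => p.2)) []
  rw [hfold, List.nil_append]
  rw [pvAlt_parts _ (PySem.List.sorted_pairwise subtypes (fun x => x)), ← pvFmt_eq]
  congr 1
  apply congrArg (List.map _)
  -- both part lists are the (key, count) pairs in strictly increasing key order
  rw [PySem.Dict.items_counter]
  rw [pvSorted2_eq_sorted_fst _ (by
    rintro a ha b hb hab
    simp only [List.mem_map] at ha hb
    obtain ⟨k, _, rfl⟩ := ha
    obtain ⟨k', _, rfl⟩ := hb
    simp only at hab
    subst hab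
    rfl)]
  have hsorted : (PySem.List.sorted subtypes (fun x => x)).Pairwise (· ≤ ·) :=
    PySem.List.sorted_pairwise subtypes (fun x => x)
  apply PySem.List.sorted_eq_of_perm_of_pairwise_lt
  · -- permutation: both are nodup with the same members
    rw [List.perm_ext_iff_of_nodup]
    · intro p
      rw [pvPairs_mem _ hsorted p]
      constructor
      · rintro ⟨h1, h2⟩
        simp only [List.mem_map]
        refine ⟨p.1, (PySem.Set.mem_ofList _ _).mpr ((PySem.List.mem_sorted _ _ _ _).mp h1), ?_⟩
        rw [(PySem.List.sorted_perm subtypes (fun x => x) false).count_eq] at h2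
        exact Prod.ext rfl h2.symm
      · intro hp
        simp only [List.mem_map] at hp
        obtain ⟨k, hk, rfl⟩ := hp
        have hk' : k ∈ subtypes := (PySem.Set.mem_ofList _ _).mp hk
        refine ⟨(PySem.List.mem_sorted _ _ _ _).mpr hk', ?_⟩
        rw [(PySem.List.sorted_perm subtypes (fun x => x) false).count_eq]
    · -- pvPairs of a sorted list is nodup (its keys strictly increase)
      exact (pvPairs_fst_pairwise _ hsorted).imp (fun h => by
        intro he; rw [he] at h; exact lt_irrefl _ h)
    · exact (PySem.Set.nodup_ofList subtypes).map
        (fun k k' hkk => congrArg Prod.fst hkk)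
  · exact pvPairs_fst_pairwise _ hsorted
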